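-- pv_equiv track=rewrite | github.com/GGOMBAL/AIAssistant | project/service/performance_analyzer.py | _max_consecutive_true
-- ===== SOURCE A (Python) =====
-- from typing import Dict, List, Any, Optional, Tuple
--
-- def _max_consecutive_true(boolean_list: List[bool]) -> int:
--     """연속 True의 최대 길이"""
--     max_count = 0
--     current_count = 0
--
--     for value in boolean_list:
--         if value:
--             current_count += 1
--             max_count = max(max_count, current_count)
--         else:
--             current_count = 0
--
--     return max_count
-- ===== SOURCE B (Python) =====
-- def _max_consecutive_true(boolean_list):
--     """Run-scanning: skip False, measure each maximal True run with an inner pointer."""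
--     best = 0
--     i = 0
--     n = len(boolean_list)
--     while i < n:
--         if boolean_list[i]:
--             j = i
--             while j < n and boolean_list[j]:
--                 j += 1
--             if j - i > best:
--                 best = j - i
--             i = j
--         else:
--             i += 1
--     return best
-- ===== Notes on version B (the rewrite author's own statement) =====
-- stated objective: alternative
-- what changed: Replaces the running-counter-with-reset fold by a two-pointer run scanner that skips False blocks and measures each maximal True run whole.
import Mathlib
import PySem

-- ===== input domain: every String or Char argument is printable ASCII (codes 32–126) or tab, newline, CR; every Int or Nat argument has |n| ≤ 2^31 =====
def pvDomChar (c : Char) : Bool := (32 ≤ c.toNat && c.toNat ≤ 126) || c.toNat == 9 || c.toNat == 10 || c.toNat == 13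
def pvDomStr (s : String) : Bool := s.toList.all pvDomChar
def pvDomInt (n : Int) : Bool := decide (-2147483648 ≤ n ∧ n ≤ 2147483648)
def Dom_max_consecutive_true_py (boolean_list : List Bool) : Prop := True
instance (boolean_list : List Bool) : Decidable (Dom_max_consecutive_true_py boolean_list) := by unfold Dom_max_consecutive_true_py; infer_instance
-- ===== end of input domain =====

-- B replaces A's running-counter-with-reset fold by a two-pointer run scanner (skip False, measure each maximal True run); same cost, different decomposition.


-- ===== PORT A =====
-- literal port of A's loop: state = (max_count, current_count)
def max_consecutive_true_py (boolean_list : List Bool) : Int :=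
  (boolean_list.foldl
    (fun (st : Int × Int) value =>
      if value then (max st.1 (st.2 + 1), st.2 + 1) else (st.1, 0))
    (0, 0)).1

-- ===== PORT B =====
-- port of Source B's run scanner: skip a False, or take a whole maximal True run (the inner
-- while loop j advancing over Trues = takeWhile/dropWhile) and continue after it
def altGo : List Bool → Int
  | [] => 0
  | false :: t => altGo t
  | true :: t =>
      max (((t.takeWhile (· = true)).length : Int) + 1) (altGo (t.dropWhile (· = true)))
termination_by l => l.length
decreasing_by
· simp
· exact Nat.lt_succ_of_le (List.length_dropWhile_le _ t)

def max_consecutive_true_py_alt (boolean_list : List Bool) : Int :=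
  altGo boolean_list

-- ===== PRECONDITION & SPEC =====
def Spec_max_consecutive_true_py (boolean_list : List Bool) (out : Int) : Prop := out = max_consecutive_true_py_alt boolean_list
instance (boolean_list : List Bool) (out : Int) : Decidable (Spec_max_consecutive_true_py boolean_list out) := by unfold Spec_max_consecutive_true_py; infer_instance

-- ===== CLAIM (what is proved, stated in full; the proofs are below) =====
def Claim_equal_max_consecutive_true_py : Prop := ∀ (boolean_list : List Bool), Dom_max_consecutive_true_py boolean_list → Spec_max_consecutive_true_py boolean_list (max_consecutive_true_py boolean_list)

-- ===== LEMMAS AND PROOFS =====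

-- abbreviation for A's loop body
def stepA (st : Int × Int) (value : Bool) : Int × Int :=
  if value then (max st.1 (st.2 + 1), st.2 + 1) else (st.1, 0)

lemma stepA_false (st : Int × Int) : stepA st false = (st.1, 0) := rfl
lemma stepA_true (st : Int × Int) : stepA st true = (max st.1 (st.2 + 1), st.2 + 1) := rfl

lemma max_consecutive_true_py_eq_fold (l : List Bool) :
    max_consecutive_true_py l = (l.foldl stepA (0, 0)).1 := rfl

lemma foldA_max_split (l : List Bool) : ∀ m c : Int, 0 ≤ m → 0 ≤ c →
    (l.foldl stepA (m, c)).1 = max m (l.foldl stepA (0, c)).1 := by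
  induction l with
  | nil => intro m c hm _; simp only [List.foldl_nil]; omega
  | cons b t ih =>
    intro m c hm hc
    cases b with
    | false =>
      simp only [List.foldl_cons, stepA_false]
      rw [ih m 0 hm le_rfl]
    | true =>
      simp only [List.foldl_cons, stepA_true]
      rw [ih (max m (c + 1)) (c + 1) (by omega) (by omega),
          ih (max 0 (c + 1)) (c + 1) (by omega) (by omega)]
      omega

lemma foldA_eq_altGo (l : List Bool) :
    (l.foldl stepA (0, 0)).1 = altGo l ∧
    (∀ c : Int, 0 ≤ c →
      max (c + 1) (l.foldl stepA (0, c + 1)).1 =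
      max (c + 1 + ((l.takeWhile (· = true)).length : Int)) (altGo (l.dropWhile (· = true)))) := by
  induction l with
  | nil =>
    refine ⟨by simp [altGo], fun c _ => ?_⟩
    simp [altGo]
  | cons b t ih =>
    obtain ⟨ih1, ih2⟩ := ih
    cases b with
    | false =>
      refine ⟨?_, ?_⟩
      · simp only [List.foldl_cons, stepA_false]
        rw [ih1]; simp [altGo]
      · intro c hc
        simp only [List.foldl_cons, stepA_false]
        rw [ih1]
        simp [altGo]
    | true =>
      refine ⟨?_, ?_⟩
      · simp only [List.foldl_cons, stepA_true]
        rw [foldA_max_split t (max 0 (0 + 1)) (0 + 1) (by omega) (by omega)]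
        have h2 := ih2 0 le_rfl
        simp only [altGo]
        push_cast at h2 ⊢
        omega
      · intro c hc
        simp only [List.foldl_cons, stepA_true]
        rw [foldA_max_split t (max 0 (c + 1 + 1)) (c + 1 + 1) (by omega) (by omega)]
        have h2 := ih2 (c + 1) (by omega)
        simp only [List.takeWhile_cons, List.dropWhile_cons, decide_true, if_true,
          List.length_cons]
        push_cast at h2 ⊢
        omega

-- ===== VERDICT (by name: the statement is the Claim_ definition above) =====
theorem max_consecutive_true_py_spec : Claim_equal_max_consecutive_true_py := by
  intro l _
  show max_consecutive_true_py l = max_consecutive_true_py_alt l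
  rw [max_consecutive_true_py_eq_fold]
  exact (foldA_eq_altGo l).1
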